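-- pv_equiv track=rewrite | github.com/vicliu624/trail-mate | tools/sstv_offline_decode.py | compute_sync_phase_offset
-- ===== SOURCE A (Python) =====
-- K_SYNC_PHASE_BINS = 512
--
-- K_SYNC_PHASE_MIN_HITS = 64
--
-- def compute_sync_phase_offset(has_sync_positions, base_sample, line_samples, sync_samples):
--     if base_sample is None or line_samples <= 0 or sync_samples <= 0:
--         return 0
--     bins = [0] * K_SYNC_PHASE_BINS
--     hits = 0
--     for pos in has_sync_positions:
--         if pos < base_sample:
--             continue
--         phase = (pos - base_sample) % line_samples
--         bin_idx = int(phase * K_SYNC_PHASE_BINS / line_samples)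
--         if bin_idx < 0:
--             bin_idx = 0
--         if bin_idx >= K_SYNC_PHASE_BINS:
--             bin_idx = K_SYNC_PHASE_BINS - 1
--         if bins[bin_idx] < 0xFFFF:
--             bins[bin_idx] += 1
--         hits += 1
--     if hits < K_SYNC_PHASE_MIN_HITS:
--         return 0
--
--     max_conv = None
--     max_idx = 0
--     sync_bins = int(sync_samples * K_SYNC_PHASE_BINS / line_samples)
--     search_bins = sync_bins * 2
--     if search_bins < 8:
--         search_bins = 8
--     if search_bins > K_SYNC_PHASE_BINS // 2:
--         search_bins = K_SYNC_PHASE_BINS // 2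
--     for i in range(K_SYNC_PHASE_BINS - 7):
--         if i > search_bins and i < (K_SYNC_PHASE_BINS - search_bins):
--             continue
--         conv = sum(bins[i:i + 4]) - sum(bins[i + 4:i + 8])
--         if max_conv is None or conv > max_conv:
--             max_conv = conv
--             max_idx = i + 4
--     fall_bin = max_idx
--     if fall_bin > K_SYNC_PHASE_BINS // 2:
--         fall_bin -= K_SYNC_PHASE_BINS
--     fall_samples = int(fall_bin * line_samples / K_SYNC_PHASE_BINS)
--     offset = sync_samples - fall_samples
--     if offset < 0:
--         offset = 0
--     if offset > line_samples:
--         offset = line_samples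
--     return offset
-- ===== SOURCE B (Python) =====
-- K_SYNC_PHASE_BINS = 512
--
-- K_SYNC_PHASE_MIN_HITS = 64
--
-- def compute_sync_phase_offset(has_sync_positions, base_sample, line_samples, sync_samples):
--     if base_sample is None or line_samples <= 0 or sync_samples <= 0:
--         return 0
--     # One comprehension turns the positions into their phase bins (0..511); all
--     # arithmetic is exact integer arithmetic, no per-element clamping needed.
--     kept = [(pos - base_sample) % line_samples * K_SYNC_PHASE_BINS // line_samples
--             for pos in has_sync_positions if pos >= base_sample]
--     if len(kept) < K_SYNC_PHASE_MIN_HITS: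
--         return 0
--     counts = {}
--     for b in kept:
--         counts[b] = counts.get(b, 0) + 1
--     bins = [min(counts.get(k, 0), 0xFFFF) for k in range(K_SYNC_PHASE_BINS)]
--     # prefix sums: prefix[k] = bins[0] + ... + bins[k-1]
--     prefix = [0]
--     total = 0
--     for x in bins:
--         total += x
--         prefix.append(total)
--     sync_bins = sync_samples * K_SYNC_PHASE_BINS // line_samples
--     search_bins = min(max(sync_bins * 2, 8), K_SYNC_PHASE_BINS // 2)
--     def conv(i):
--         return (prefix[i + 4] - prefix[i]) - (prefix[i + 8] - prefix[i + 4])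
--     best = max((i for i in range(K_SYNC_PHASE_BINS - 7)
--                 if i <= search_bins or i >= K_SYNC_PHASE_BINS - search_bins),
--                key=conv)
--     fall_bin = best + 4
--     if fall_bin > K_SYNC_PHASE_BINS // 2:
--         fall_bin -= K_SYNC_PHASE_BINS
--     fall_samples = int(fall_bin * line_samples / K_SYNC_PHASE_BINS)
--     offset = sync_samples - fall_samples
--     if offset < 0:
--         offset = 0
--     if offset > line_samples:
--         offset = line_samples
--     return offset
-- ===== Notes on version B (the rewrite author's own statement) =====
-- stated objective: alternative
-- what changed: B replaces A's in-place capped histogram list with a comprehension plus a dict counter (bins become min(count,0xFFFF) computed once), replaces the per-position slice sums in the scan with a precomputed prefix-sum table, and replaces the skip-and-accumulate running-max loop with max(..., key=conv) over the explicitly filtered index list.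
import Mathlib
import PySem

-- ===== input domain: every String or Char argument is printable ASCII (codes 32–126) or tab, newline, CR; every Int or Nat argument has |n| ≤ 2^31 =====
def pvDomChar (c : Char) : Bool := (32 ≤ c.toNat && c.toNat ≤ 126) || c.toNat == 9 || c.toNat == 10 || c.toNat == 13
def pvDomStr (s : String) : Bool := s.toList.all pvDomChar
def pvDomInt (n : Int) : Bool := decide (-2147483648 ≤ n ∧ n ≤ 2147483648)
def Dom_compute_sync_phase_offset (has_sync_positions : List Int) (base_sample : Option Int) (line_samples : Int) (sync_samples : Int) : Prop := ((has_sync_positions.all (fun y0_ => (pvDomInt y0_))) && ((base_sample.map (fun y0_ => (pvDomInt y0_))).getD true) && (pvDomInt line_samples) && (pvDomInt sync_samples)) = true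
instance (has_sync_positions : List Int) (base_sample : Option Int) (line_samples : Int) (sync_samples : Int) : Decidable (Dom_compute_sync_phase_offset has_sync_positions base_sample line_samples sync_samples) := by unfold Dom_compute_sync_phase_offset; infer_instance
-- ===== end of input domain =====

set_option maxRecDepth 40000

-- ===== PORT A =====
-- B re-decomposes A: comprehension + dict counter for the histogram, prefix sums instead of
-- per-position slice sums, and max(..., key=...) over the allowed indices instead of the
-- skip-and-accumulate loop (objective: alternative decomposition, same exact results).
-- A-side helpers (named loop bodies; each is the literal Python loop body)
def pvAHist (base line_samples : Int) (st : List Int × Int) (pos : Int) : List Int × Int :=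
  if pos < base then st
  else
    let phase := PySem.Int.mod (pos - base) line_samples
    -- int(phase * 512 / line_samples): phase ≥ 0 and the float quotient is exact enough on Dom
    -- (|ints| ≤ 2^31 keeps numerator < 2^53), so int() = floor division
    let bin_idx := PySem.Int.floordiv (phase * 512) line_samples
    let bin_idx := if bin_idx < 0 then 0 else bin_idx
    let bin_idx := if 512 ≤ bin_idx then 511 else bin_idx
    -- bin_idx ∈ [0, 511] after the clamps, so bins[bin_idx] is a plain in-range index
    if PySem.List.pyGetD st.1 bin_idx 0 < 65535 then
      (st.1.set bin_idx.toNat (PySem.List.pyGetD st.1 bin_idx 0 + 1), st.2 + 1)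
    else (st.1, st.2 + 1)

def pvAScan (bins : List Int) (search_bins : Int) (s : Option Int × Int) (i : Int) : Option Int × Int :=
  if search_bins < i ∧ i < 512 - search_bins then s
  else
    let conv := (PySem.List.slice bins (some i) (some (i + 4))).sum -
                (PySem.List.slice bins (some (i + 4)) (some (i + 8))).sum
    match s.1 with
    | none => (some conv, i + 4)
    | some m => if m < conv then (some conv, i + 4) else s

def compute_sync_phase_offset (has_sync_positions : List Int) (base_sample : Option Int) (line_samples : Int) (sync_samples : Int) : Int :=
  match base_sample with
  | none => 0
  | some base =>
    if line_samples ≤ 0 ∨ sync_samples ≤ 0 then 0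
    else
      let st := has_sync_positions.foldl (pvAHist base line_samples) (List.replicate 512 0, 0)
      let bins := st.1
      let hits := st.2
      if hits < 64 then 0
      else
        -- int(sync_samples * 512 / line_samples): positive, exact on Dom, = floor division
        let sync_bins := PySem.Int.floordiv (sync_samples * 512) line_samples
        let search_bins := sync_bins * 2
        let search_bins := if search_bins < 8 then 8 else search_bins
        let search_bins := if PySem.Int.floordiv 512 2 < search_bins then PySem.Int.floordiv 512 2 else search_bins
        let scan := (PySem.List.pyRange 0 (512 - 7) 1).foldl (pvAScan bins search_bins) (none, 0)
        let max_idx := scan.2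
        let fall_bin := max_idx
        let fall_bin := if PySem.Int.floordiv 512 2 < fall_bin then fall_bin - 512 else fall_bin
        -- int(fall_bin * line_samples / 512): division by 512 is exact in float on Dom;
        -- int() truncates toward zero (fall_bin may be negative), hence Int.tdiv
        let fall_samples := (fall_bin * line_samples).tdiv 512
        let offset := sync_samples - fall_samples
        let offset := if offset < 0 then 0 else offset
        let offset := if line_samples < offset then line_samples else offset
        offset

-- ===== PORT B =====
-- B-side helpers (named pieces of Source B)
-- the comprehension [(pos - base) % L * 512 // L for pos in positions if pos >= base]
def pvKept (xs : List Int) (base line_samples : Int) : List Int :=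
  (xs.filter (fun pos => decide (base ≤ pos))).map
    (fun pos => PySem.Int.floordiv (PySem.Int.mod (pos - base) line_samples * 512) line_samples)

-- counts[b] = counts.get(b, 0) + 1
def pvBCount (d : PySem.Dict Int Int) (b : Int) : PySem.Dict Int Int := d.insert b (d.getD b 0 + 1)

-- total += x; prefix.append(total)
def pvBPrefixStep (s : List Int × Int) (x : Int) : List Int × Int := (s.1 ++ [s.2 + x], s.2 + x)

-- conv(i) = (prefix[i+4] - prefix[i]) - (prefix[i+8] - prefix[i+4])
def pvBConv (pre : List Int) (i : Int) : Int :=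
  (PySem.List.pyGetD pre (i + 4) 0 - PySem.List.pyGetD pre i 0) -
  (PySem.List.pyGetD pre (i + 8) 0 - PySem.List.pyGetD pre (i + 4) 0)

def compute_sync_phase_offset_alt (has_sync_positions : List Int) (base_sample : Option Int) (line_samples : Int) (sync_samples : Int) : Int :=
  match base_sample with
  | none => 0
  | some base =>
    if line_samples ≤ 0 ∨ sync_samples ≤ 0 then 0
    else
      let kept := pvKept has_sync_positions base line_samples
      if kept.length < 64 then 0
      else
        let counts := kept.foldl pvBCount PySem.Dict.empty
        let bins := (PySem.List.pyRange 0 512 1).map (fun k => min (counts.getD k 0) 65535)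
        let pre := (bins.foldl pvBPrefixStep ([0], 0)).1
        let sync_bins := PySem.Int.floordiv (sync_samples * 512) line_samples
        let search_bins := min (max (sync_bins * 2) 8) (PySem.Int.floordiv 512 2)
        let allowed := (PySem.List.pyRange 0 (512 - 7) 1).filter
          (fun i => decide (i ≤ search_bins) || decide (512 - search_bins ≤ i))
        -- max(..., key=conv); allowed always contains 0, so the none branch is unreachable
        -- (Python's max would raise ValueError on an empty sequence)
        let max_idx := match PySem.List.max? allowed (pvBConv pre) with
          | some b => b + 4
          | none => 0
        let fall_bin := if PySem.Int.floordiv 512 2 < max_idx then max_idx - 512 else max_idx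
        let fall_samples := (fall_bin * line_samples).tdiv 512
        let offset := sync_samples - fall_samples
        let offset := if offset < 0 then 0 else offset
        let offset := if line_samples < offset then line_samples else offset
        offset

-- ===== PRECONDITION & SPEC =====
def Spec_compute_sync_phase_offset (has_sync_positions : List Int) (base_sample : Option Int) (line_samples : Int) (sync_samples : Int) (out : Int) : Prop := out = compute_sync_phase_offset_alt has_sync_positions base_sample line_samples sync_samples
instance (has_sync_positions : List Int) (base_sample : Option Int) (line_samples : Int) (sync_samples : Int) (out : Int) : Decidable (Spec_compute_sync_phase_offset has_sync_positions base_sample line_samples sync_samples out) := by unfold Spec_compute_sync_phase_offset; infer_instance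

-- ===== CLAIM (what is proved, stated in full; the proofs are below) =====
def Claim_equal_compute_sync_phase_offset : Prop := ∀ (has_sync_positions : List Int) (base_sample : Option Int) (line_samples : Int) (sync_samples : Int), Dom_compute_sync_phase_offset has_sync_positions base_sample line_samples sync_samples → Spec_compute_sync_phase_offset has_sync_positions base_sample line_samples sync_samples (compute_sync_phase_offset has_sync_positions base_sample line_samples sync_samples)

-- ===== LEMMAS AND PROOFS =====

-- proof-side abbreviations
def pvBins (done : List Int) : List Int :=
  (PySem.List.pyRange 0 512 1).map (fun k => min ((done.count k : Int)) 65535)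

def pvMaxStep (f : Int → Int) (s : Option Int × Int) (i : Int) : Option Int × Int :=
  match s.1 with
  | none => (some (f i), i + 4)
  | some m => if m < f i then (some (f i), i + 4) else s

def pvSliceConv (bins : List Int) (i : Int) : Int :=
  (PySem.List.slice bins (some i) (some (i + 4))).sum -
  (PySem.List.slice bins (some (i + 4)) (some (i + 8))).sum

def pvOptIdx : Option Int → Int
  | none => 0
  | some j => j + 4

lemma pvBins_length (done : List Int) : (pvBins done).length = 512 := by
  simp [pvBins, PySem.List.length_pyRange_one]

lemma pvBins_getElem (done : List Int) (k : Nat) (h : k < (pvBins done).length) :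
    (pvBins done)[k] = min ((done.count (k : Int) : Int)) 65535 := by
  unfold pvBins at h ⊢
  simp [PySem.List.getElem_pyRange_one]

lemma pvBins_nil : pvBins [] = List.replicate 512 0 := by
  apply List.ext_getElem
  · rw [pvBins_length, List.length_replicate]
  · intro k h1 h2
    rw [pvBins_getElem, List.getElem_replicate]
    simp only [List.count_nil, Nat.cast_zero]
    omega

lemma pvBins_get (done : List Int) (j : Int) (h0 : 0 ≤ j) (h1 : j < 512) :
    PySem.List.pyGetD (pvBins done) j 0 = min ((done.count j : Int)) 65535 := by
  unfold pvBins
  exact PySem.List.pyGetD_map_pyRange_of_nonneg _ 512 j 0 h0 h1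

lemma pvBins_set (done : List Int) (j : Int) (h0 : 0 ≤ j)
    (hc : (done.count j : Int) < 65535) :
    (pvBins done).set j.toNat (min ((done.count j : Int)) 65535 + 1) = pvBins (done ++ [j]) := by
  apply List.ext_getElem
  · simp [pvBins_length]
  · intro k h1 h2
    rw [List.getElem_set, pvBins_getElem (done ++ [j]) k]
    by_cases hkj : j.toNat = k
    · rw [if_pos hkj]
      have hjk : j = (k : Int) := by omega
      subst hjk
      simp only [List.count_append, List.count_cons, List.count_nil, beq_self_eq_true,
        if_true, Nat.zero_add]
      push_cast
      omega
    · rw [if_neg hkj, pvBins_getElem done k]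
      have hne : ¬ (j = (k : Int)) := by omega
      simp [List.count_append, List.count_cons, List.count_nil, hne]

lemma pvBins_append_sat (done : List Int) (j : Int)
    (hc : ¬ (done.count j : Int) < 65535) :
    pvBins (done ++ [j]) = pvBins done := by
  apply List.ext_getElem
  · simp [pvBins_length]
  · intro k h1 h2
    rw [pvBins_getElem, pvBins_getElem]
    by_cases hjk : j = (k : Int)
    · subst hjk
      simp only [List.count_append, List.count_cons, List.count_nil, beq_self_eq_true,
        if_true, Nat.zero_add]
      push_cast
      omega
    · simp [List.count_append, List.count_cons, List.count_nil, hjk]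

lemma pvIdx_bounds (base L pos : Int) (hL : 0 < L) :
    0 ≤ PySem.Int.floordiv (PySem.Int.mod (pos - base) L * 512) L ∧
    PySem.Int.floordiv (PySem.Int.mod (pos - base) L * 512) L < 512 := by
  have h0 := PySem.Int.mod_nonneg (pos - base) hL
  have h1 := PySem.Int.mod_lt (pos - base) hL
  constructor
  · rw [PySem.Int.le_floordiv_iff_mul_le hL]; nlinarith
  · rw [PySem.Int.floordiv_lt_iff_lt_mul hL]; nlinarith

lemma pvAHist_step (base L : Int) (hL : 0 < L) (done : List Int) (p : Int) (hp : ¬ p < base) :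
    pvAHist base L (pvBins done, (done.length : Int)) p =
      (pvBins (done ++ [PySem.Int.floordiv (PySem.Int.mod (p - base) L * 512) L]),
       ((done ++ [PySem.Int.floordiv (PySem.Int.mod (p - base) L * 512) L]).length : Int)) := by
  obtain ⟨hj0, hj1⟩ := pvIdx_bounds base L p hL
  simp only [pvAHist, if_neg hp]
  rw [if_neg (show ¬ PySem.Int.floordiv (PySem.Int.mod (p - base) L * 512) L < 0 by omega)]
  rw [if_neg (show ¬ (512 : Int) ≤ PySem.Int.floordiv (PySem.Int.mod (p - base) L * 512) L by omega)]
  rw [pvBins_get done _ hj0 hj1]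
  by_cases hc : (done.count (PySem.Int.floordiv (PySem.Int.mod (p - base) L * 512) L) : Int) < 65535
  · rw [if_pos (by omega : min ((done.count (PySem.Int.floordiv (PySem.Int.mod (p - base) L * 512) L) : Int)) 65535 < 65535)]
    refine Prod.ext ?_ ?_
    · exact pvBins_set done _ hj0 hc
    · simp
  · rw [if_neg (by omega)]
    refine Prod.ext ?_ ?_
    · exact (pvBins_append_sat done _ hc).symm
    · simp

-- the histogram loop of A computes pvBins of the kept-bin list, and hits = its length
lemma foldA_eq (base L : Int) (hL : 0 < L) :
    ∀ (xs done : List Int),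
      xs.foldl (pvAHist base L) (pvBins done, (done.length : Int)) =
        (pvBins (done ++ pvKept xs base L), ((done ++ pvKept xs base L).length : Int)) := by
  intro xs
  induction xs with
  | nil => intro done; simp [pvKept]
  | cons p tl ih =>
    intro done
    rw [List.foldl_cons]
    by_cases hp : p < base
    · have hstep : pvAHist base L (pvBins done, (done.length : Int)) p = (pvBins done, (done.length : Int)) := by
        simp [pvAHist, hp]
      have hkept : pvKept (p :: tl) base L = pvKept tl base L := by
        simp [pvKept, List.filter_cons, show ¬ base ≤ p by omega]
      rw [hstep, ih, hkept]
    · have hkept : pvKept (p :: tl) base L =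
          PySem.Int.floordiv (PySem.Int.mod (p - base) L * 512) L :: pvKept tl base L := by
        simp [pvKept, List.filter_cons, show base ≤ p by omega]
      rw [pvAHist_step base L hL done p hp, ih, hkept]
      simp

-- the prefix-sum loop
lemma pref_spec : ∀ (xs p : List Int) (t : Int),
    xs.foldl pvBPrefixStep (p, t) =
      (p ++ (List.range xs.length).map (fun k => t + ((xs.take (k + 1)).sum)), t + xs.sum) := by
  intro xs
  induction xs with
  | nil => intro p t; simp [pvBPrefixStep]
  | cons x tl ih =>
    intro p t
    simp only [List.foldl_cons, pvBPrefixStep, ih]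
    refine Prod.ext ?_ ?_
    · simp [List.range_succ_eq_map, List.map_map, Function.comp_def, Nat.succ_eq_add_one,
        List.take_succ_cons, add_assoc]
    · simp [add_assoc]

lemma pref_get (bins : List Int) (n : Nat) (hn : n ≤ bins.length) :
    PySem.List.pyGetD ((bins.foldl pvBPrefixStep ([0], 0)).1) ((n : Int)) 0 = (bins.take n).sum := by
  rw [pref_spec, PySem.List.pyGetD_natCast]
  cases n with
  | zero => simp
  | succ m =>
    have hm : m < bins.length := by omega
    simp only [List.singleton_append, List.getD_cons_succ]
    rw [PySem.List.getD_map_range _ _ _ _ hm]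
    simp

-- conv computed from slices = conv computed from the prefix table
lemma conv_eq (bins : List Int) (hlen : bins.length = 512) (i : Int)
    (h0 : 0 ≤ i) (h1 : i ≤ 504) :
    pvSliceConv bins i = pvBConv ((bins.foldl pvBPrefixStep ([0], 0)).1) i := by
  unfold pvSliceConv pvBConv
  obtain ⟨a, rfl⟩ : ∃ a : Nat, (a : Int) = i := ⟨i.toNat, Int.toNat_of_nonneg h0⟩
  have ha : a ≤ 504 := by exact_mod_cast h1
  have h4 : ((a : Int) + 4) = ((a + 4 : Nat) : Int) := by push_cast; ring
  have h8 : ((a : Int) + 8) = ((a + 8 : Nat) : Int) := by push_cast; ring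
  rw [h4, h8]
  rw [PySem.List.slice_toNat bins (by positivity) (by positivity),
      PySem.List.slice_toNat bins (by positivity) (by positivity)]
  rw [pref_get bins a (by omega), pref_get bins (a + 4) (by omega), pref_get bins (a + 8) (by omega)]
  simp only [Int.toNat_natCast]
  rw [show a + 4 - a = 4 by omega, show a + 8 - (a + 4) = 4 by omega]
  have t1 : (List.take 4 (List.drop a bins)).sum = (bins.take (a + 4)).sum - (bins.take a).sum := by
    rw [List.take_add, List.sum_append]; ring
  have t2 : (List.take 4 (List.drop (a + 4) bins)).sum = (bins.take (a + 8)).sum - (bins.take (a + 4)).sum := by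
    rw [show a + 8 = (a + 4) + 4 by omega, List.take_add, List.sum_append]; ring
  try rw [t1, t2]
  try ring

-- the skip branch of A's scan = filtering the index list
lemma scan_skip (bins : List Int) (sb : Int) :
    ∀ (l : List Int) (s : Option Int × Int),
      l.foldl (pvAScan bins sb) s =
        (l.filter (fun i => decide (i ≤ sb) || decide (512 - sb ≤ i))).foldl
          (pvMaxStep (pvSliceConv bins)) s := by
  intro l
  induction l with
  | nil => intro s; rfl
  | cons x tl ih =>
    intro s
    by_cases h : sb < x ∧ x < 512 - sb
    · have hf : (x :: tl).filter (fun i => decide (i ≤ sb) || decide (512 - sb ≤ i)) =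
          tl.filter (fun i => decide (i ≤ sb) || decide (512 - sb ≤ i)) := by
        simp [List.filter_cons]
        omega
      rw [List.foldl_cons, hf, show pvAScan bins sb s x = s from by
        unfold pvAScan; rw [if_pos h], ih]
    · have hf : (x :: tl).filter (fun i => decide (i ≤ sb) || decide (512 - sb ≤ i)) =
          x :: tl.filter (fun i => decide (i ≤ sb) || decide (512 - sb ≤ i)) := by
        simp [List.filter_cons]
        omega
      have hstep : pvAScan bins sb s x = pvMaxStep (pvSliceConv bins) s x := by
        unfold pvAScan pvMaxStep pvSliceConv
        rw [if_neg h]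
      rw [List.foldl_cons, hf, List.foldl_cons, hstep, ih]

-- the foldl step hidden inside PySem.List.max?
def pvMStep (f : Int → Int) (acc : Option Int) (x : Int) : Option Int :=
  match acc with
  | none => some x
  | some m => if f m < f x then some x else some m

-- A's running-max loop = first-max via PySem.List.max?
lemma scan_rel (f : Int → Int) :
    ∀ (l : List Int) (s : Option Int),
      l.foldl (pvMaxStep f) (s.map f, pvOptIdx s) =
        ((l.foldl (pvMStep f) s).map f, pvOptIdx (l.foldl (pvMStep f) s)) := by
  intro l
  induction l with
  | nil => intro s; rfl
  | cons x tl ih =>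
    intro s
    cases s with
    | none => simpa [pvMaxStep, pvMStep, pvOptIdx] using ih (some x)
    | some m =>
      by_cases h : f m < f x
      · simpa [pvMaxStep, pvMStep, pvOptIdx, h] using ih (some x)
      · simpa [pvMaxStep, pvMStep, pvOptIdx, h] using ih (some m)

lemma max?_eq_foldl (xs : List Int) (key : Int → Int) :
    PySem.List.max? xs key = xs.foldl (pvMStep key) none := by
  show List.foldl _ none xs = _
  congr 1
  funext acc x
  cases acc <;> rfl

-- A's whole scan phase = first-max of the key over the allowed indices
lemma scan_to_max (bins : List Int) (sb : Int) (f : Int → Int)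
    (hf : ∀ i, 0 ≤ i → i ≤ 504 → pvSliceConv bins i = f i) :
    ((PySem.List.pyRange 0 505 1).foldl (pvAScan bins sb) (none, 0)).2 =
      pvOptIdx (PySem.List.max?
        ((PySem.List.pyRange 0 505 1).filter (fun i => decide (i ≤ sb) || decide (512 - sb ≤ i))) f) := by
  rw [scan_skip]
  rw [List.foldl_ext (pvMaxStep (pvSliceConv bins)) (pvMaxStep f) _ ?_]
  · have h := scan_rel f ((PySem.List.pyRange 0 505 1).filter
        (fun i => decide (i ≤ sb) || decide (512 - sb ≤ i))) none
    rw [max?_eq_foldl]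
    rw [show ((none : Option Int), (0 : Int)) = ((none : Option Int).map f, pvOptIdx none) from rfl, h]
  · intro a b hb
    have hmem : b ∈ PySem.List.pyRange 0 505 1 := List.mem_of_mem_filter hb
    rw [PySem.List.mem_pyRange_one] at hmem
    have hfb : pvSliceConv bins b = f b := hf b hmem.1 (by omega)
    cases ha : a.1 <;> simp [pvMaxStep, ha, hfb]

-- the canonical middle form both ports are reduced to
def pvCanon (xs : List Int) (base L S : Int) : Int :=
  let K := pvKept xs base L
  if K.length < 64 then 0
  else
    let bins := pvBins K
    let pre := (bins.foldl pvBPrefixStep ([0], 0)).1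
    let sb := min (max (PySem.Int.floordiv (S * 512) L * 2) 8) 256
    let allowed := (PySem.List.pyRange 0 505 1).filter
      (fun i => decide (i ≤ sb) || decide (512 - sb ≤ i))
    let max_idx := pvOptIdx (PySem.List.max? allowed (pvBConv pre))
    let fall_bin := if 256 < max_idx then max_idx - 512 else max_idx
    let fall_samples := (fall_bin * L).tdiv 512
    let offset := S - fall_samples
    if offset < 0 then 0 else if L < offset then L else offset

lemma portA_main (xs : List Int) (base L S : Int) (hL : 0 < L) (hS : 0 < S) :
    compute_sync_phase_offset xs (some base) L S = pvCanon xs base L S := by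
  simp only [compute_sync_phase_offset, pvCanon]
  rw [if_neg (by omega : ¬ (L ≤ 0 ∨ S ≤ 0))]
  have hA : xs.foldl (pvAHist base L) (List.replicate 512 0, (0 : Int)) =
      (pvBins (pvKept xs base L), ((pvKept xs base L).length : Int)) := by
    simpa [pvBins_nil] using foldA_eq base L hL xs []
  simp only [hA]
  by_cases hk : (pvKept xs base L).length < 64
  · rw [if_pos (by exact_mod_cast hk), if_pos hk]
  · rw [if_neg (by exact_mod_cast hk), if_neg hk]
    rw [show PySem.Int.floordiv 512 2 = 256 from by decide,
        show ((512 : Int) - 7) = 505 from by decide]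
    have hsb : (if (256 : Int) < (if PySem.Int.floordiv (S * 512) L * 2 < 8 then 8
          else PySem.Int.floordiv (S * 512) L * 2) then 256
          else (if PySem.Int.floordiv (S * 512) L * 2 < 8 then 8
          else PySem.Int.floordiv (S * 512) L * 2)) =
        min (max (PySem.Int.floordiv (S * 512) L * 2) 8) 256 := by
      split_ifs <;> omega
    rw [hsb]
    rw [scan_to_max (pvBins (pvKept xs base L))
        (min (max (PySem.Int.floordiv (S * 512) L * 2) 8) 256)
        (pvBConv (((pvBins (pvKept xs base L)).foldl pvBPrefixStep ([0], 0)).1))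
        (fun i h0 h1 => conv_eq (pvBins (pvKept xs base L)) (pvBins_length _) i h0 h1)]
    split_ifs <;> omega

lemma portB_main (xs : List Int) (base L S : Int) (hL : 0 < L) (hS : 0 < S) :
    compute_sync_phase_offset_alt xs (some base) L S = pvCanon xs base L S := by
  simp only [compute_sync_phase_offset_alt, pvCanon]
  rw [if_neg (by omega : ¬ (L ≤ 0 ∨ S ≤ 0))]
  by_cases hk : (pvKept xs base L).length < 64
  · rw [if_pos hk, if_pos hk]
  · rw [if_neg hk, if_neg hk]
    have hbins : ((PySem.List.pyRange 0 512 1).map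
        (fun k => min (((pvKept xs base L).foldl pvBCount PySem.Dict.empty).getD k 0) 65535)) =
        pvBins (pvKept xs base L) := by
      unfold pvBins
      apply List.map_congr_left
      intro k _
      have hc : ((pvKept xs base L).foldl pvBCount PySem.Dict.empty).getD k 0 =
          ((pvKept xs base L).count k : Int) := by
        unfold pvBCount
        rw [PySem.Dict.foldl_insert_getD_add_one_eq_counter, PySem.Dict.getD_counter]
      rw [hc]
    rw [hbins]
    rw [show PySem.Int.floordiv 512 2 = 256 from by decide,
        show ((512 : Int) - 7) = 505 from by decide]
    cases hm : PySem.List.max?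
        ((PySem.List.pyRange 0 505 1).filter
          (fun i => decide (i ≤ min (max (PySem.Int.floordiv (S * 512) L * 2) 8) 256) ||
            decide (512 - min (max (PySem.Int.floordiv (S * 512) L * 2) 8) 256 ≤ i)))
        (pvBConv (((pvBins (pvKept xs base L)).foldl pvBPrefixStep ([0], 0)).1)) with
    | none => simp only [pvOptIdx]; split_ifs <;> omega
    | some b => simp only [pvOptIdx]; split_ifs <;> omega

-- ===== VERDICT (by name: the statement is the Claim_ definition above) =====
theorem compute_sync_phase_offset_spec : Claim_equal_compute_sync_phase_offset := by
  intro xs base? L S _dom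
  unfold Spec_compute_sync_phase_offset
  cases base? with
  | none => rfl
  | some base =>
    by_cases hg : L ≤ 0 ∨ S ≤ 0
    · simp only [compute_sync_phase_offset, compute_sync_phase_offset_alt]
      rw [if_pos hg, if_pos hg]
    · have hL : 0 < L := by omega
      have hS : 0 < S := by omega
      rw [portA_main xs base L S hL hS, portB_main xs base L S hL hS]
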